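-- pv_equiv track=rewrite | github.com/chuang-DH/qPCR_primer_app | qPCR_primer_streamlit.py | is_self_complementary
-- ===== SOURCE A (Python) =====
-- def sanitize_seq(seq):
--     if seq is None:
--         return ""
--     valid = {"A", "T", "C", "G"}
--     return ''.join([ch for ch in seq.upper() if ch in valid])
--
-- def reverse_complement(seq):
--     seq = sanitize_seq(seq)
--     if not seq:
--         return ""
--     comp = {'A': 'T', 'T': 'A', 'C': 'G', 'G': 'C'}
--     return ''.join(comp.get(base, base) for base in reversed(seq))
--
-- def is_self_complementary(seq, min_match=4):
--     seq = sanitize_seq(seq)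
--     length = len(seq)
--     if length < min_match + 1:
--         return False
--     rev_comp = reverse_complement(seq)
--     for shift in range(1, length):
--         match = 0
--         for i in range(length - shift):
--             if seq[i] == rev_comp[i + shift]:
--                 match += 1
--                 if match >= min_match:
--                     return True
--             else:
--                 match = 0
--     return False
-- ===== SOURCE B (Python) =====
-- def sanitize_seq(seq):
--     if seq is None:
--         return ""
--     valid = {"A", "T", "C", "G"}
--     return ''.join([ch for ch in seq.upper() if ch in valid])
--
-- def reverse_complement(seq):
--     seq = sanitize_seq(seq)
--     if not seq:
--         return ""
--     comp = {'A': 'T', 'T': 'A', 'C': 'G', 'G': 'C'}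
--     return ''.join(comp.get(base, base) for base in reversed(seq))
--
-- def is_self_complementary(seq, min_match=4):
--     seq = sanitize_seq(seq)
--     n = len(seq)
--     if n < min_match + 1:
--         return False
--     rev_comp = reverse_complement(seq)
--     m = max(min_match, 1)
--     return any(rev_comp.find(seq[p:p + m], p + 1) != -1 for p in range(n - m + 1))
-- ===== Notes on version B (the rewrite author's own statement) =====
-- stated objective: alternative
-- what changed: A scans every shift with a running match counter over aligned positions; B instead slides a single fixed-length window (length max(min_match,1)) over the sanitized sequence and, for each window, searches the reverse complement for that exact substring starting strictly after the window's position (str.find with a start offset).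
import Mathlib
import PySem

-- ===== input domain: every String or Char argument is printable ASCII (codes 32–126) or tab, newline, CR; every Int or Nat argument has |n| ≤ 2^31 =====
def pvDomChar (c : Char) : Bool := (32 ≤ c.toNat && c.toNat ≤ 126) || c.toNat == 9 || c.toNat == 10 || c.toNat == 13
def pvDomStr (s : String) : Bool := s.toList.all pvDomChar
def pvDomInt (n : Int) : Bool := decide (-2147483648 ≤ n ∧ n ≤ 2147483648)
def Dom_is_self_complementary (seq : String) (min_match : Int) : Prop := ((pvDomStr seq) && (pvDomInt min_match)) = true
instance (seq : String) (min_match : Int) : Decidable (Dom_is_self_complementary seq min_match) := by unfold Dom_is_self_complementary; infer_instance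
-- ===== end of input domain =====

-- B replaces A's quadratic shift/run-counter scan by checking, for each fixed-length window of seq,
-- whether rev_comp contains that window at a strictly later position (str.find with a start offset).


-- ===== PORT A =====
-- shared module helpers (sanitize_seq / reverse_complement), used verbatim by both A and B
def pvSanitize (cs : List Char) : List Char :=
  (PySem.Chars.upper cs).filter (fun ch => decide (ch ∈ PySem.Set.ofList ['A', 'T', 'C', 'G']))

def pvRevComp (cs : List Char) : List Char :=
  let s := pvSanitize cs
  if s = [] then []
  else
    let comp : PySem.Dict Char Char := PySem.Dict.ofList [('A', 'T'), ('T', 'A'), ('C', 'G'), ('G', 'C')]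
    s.reverse.map (fun base => comp.getD base base)

-- the inner 'for i in range(length - shift)' loop with its running match counter and early return
def pvInner (f : Int → Bool) (mm : Int) : List Int → Int → Bool
  | [], _ => false
  | i :: rest, c =>
    if f i then
      if mm ≤ c + 1 then true else pvInner f mm rest (c + 1)
    else pvInner f mm rest 0

-- the outer 'for shift in range(1, length)' loop
def pvOuter (s rc : List Char) (mm : Int) : List Int → Bool
  | [] => false
  | shift :: rest =>
    if pvInner (fun i => PySem.List.pyGetD s i ' ' == PySem.List.pyGetD rc (i + shift) ' ')
        mm (PySem.List.pyRange 0 ((s.length : Int) - shift) 1) 0 then true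
    else pvOuter s rc mm rest

def is_self_complementary (seq : String) (min_match : Int) : Bool :=
  let s := pvSanitize seq.toList
  let length : Int := s.length
  if length < min_match + 1 then false
  else
    let rc := pvRevComp s
    pvOuter s rc min_match (PySem.List.pyRange 1 length 1)

-- ===== PORT B =====
def is_self_complementary_alt (seq : String) (min_match : Int) : Bool :=
  let s := pvSanitize seq.toList
  let n : Int := s.length
  if n < min_match + 1 then false
  else
    let rc := pvRevComp s
    let m : Int := max min_match 1
    (PySem.List.pyRange 0 (n - m + 1) 1).any (fun p =>
      PySem.Chars.findFrom rc (PySem.List.slice s (some p) (some (p + m))) (p + 1) != -1)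

-- ===== PRECONDITION & SPEC =====
def Spec_is_self_complementary (seq : String) (min_match : Int) (out : Bool) : Prop := out = is_self_complementary_alt seq min_match
instance (seq : String) (min_match : Int) (out : Bool) : Decidable (Spec_is_self_complementary seq min_match out) := by unfold Spec_is_self_complementary; infer_instance

-- ===== CLAIM (what is proved, stated in full; the proofs are below) =====
def Claim_equal_is_self_complementary : Prop := ∀ (seq : String) (min_match : Int), Dom_is_self_complementary seq min_match → Spec_is_self_complementary seq min_match (is_self_complementary seq min_match)

-- ===== LEMMAS AND PROOFS =====

-- the common characterisation: some seq-window of length M re-occurs in rev_comp strictly later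
def pvP (s rc : List Char) (M : Nat) : Prop :=
  ∃ p q : Nat, p < q ∧ q + M ≤ s.length ∧ (s.drop p).take M = (rc.drop q).take M

theorem pvSanitize_mem {cs : List Char} {c : Char} (h : c ∈ pvSanitize cs) :
    c = 'A' ∨ c = 'T' ∨ c = 'C' ∨ c = 'G' := by
  simp only [pvSanitize, List.mem_filter, decide_eq_true_eq, PySem.Set.mem_ofList] at h
  simpa using h.2

theorem pvSanitize_idem (cs : List Char) : pvSanitize (pvSanitize cs) = pvSanitize cs := by
  have h1 : PySem.Chars.upper (pvSanitize cs) = pvSanitize cs := by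
    show (pvSanitize cs).map PySem.Chars.upperChar = pvSanitize cs
    have hfix : ∀ c ∈ pvSanitize cs, PySem.Chars.upperChar c = c := by
      intro c hc
      rcases pvSanitize_mem hc with h | h | h | h <;> subst h <;> decide
    calc (pvSanitize cs).map PySem.Chars.upperChar
        = (pvSanitize cs).map id := List.map_congr_left hfix
      _ = pvSanitize cs := List.map_id _
  have h0 : pvSanitize (pvSanitize cs)
      = (PySem.Chars.upper (pvSanitize cs)).filter
        (fun ch => decide (ch ∈ PySem.Set.ofList ['A', 'T', 'C', 'G'])) := rfl
  rw [h0, h1]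
  refine List.filter_eq_self.mpr ?_
  intro c hc
  rcases pvSanitize_mem hc with h | h | h | h <;> subst h <;> decide

theorem pvRevComp_length (cs : List Char) :
    (pvRevComp (pvSanitize cs)).length = (pvSanitize cs).length := by
  unfold pvRevComp
  simp only [pvSanitize_idem]
  by_cases h : pvSanitize cs = []
  · simp [h]
  · simp [h]

-- window of a list, pointwise
theorem pv_all_window {α : Type} (l : List α) (f : α → Bool) (i M : Nat) (h : i + M ≤ l.length) :
    ((l.drop i).take M).all f = true ↔ ∀ k (hk : k < M), f (l[i + k]'(by omega)) = true := by
  rw [List.all_eq_true]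
  constructor
  · intro hall k hk
    have hm : l[i + k]'(by omega) ∈ (l.drop i).take M := by
      have he : ((l.drop i).take M)[k]'(by simp; omega) = l[i + k]'(by omega) := by
        simp [List.getElem_take, List.getElem_drop]
      rw [← he]
      exact List.getElem_mem _
    exact hall _ hm
  · intro h x hx
    rw [List.mem_iff_getElem] at hx
    obtain ⟨k, hk, rfl⟩ := hx
    have hkM : k < M := by simp at hk; omega
    have he : ((l.drop i).take M)[k] = l[i + k]'(by omega) := by
      simp [List.getElem_take, List.getElem_drop]
    rw [he]
    exact h k hkM

theorem pv_windows_eq_iff (s rc : List Char) (p q M : Nat)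
    (hp : p + M ≤ s.length) (hq : q + M ≤ rc.length) :
    (s.drop p).take M = (rc.drop q).take M ↔
      ∀ k (hk : k < M), s[p + k]'(by omega) = rc[q + k]'(by omega) := by
  constructor
  · intro h k hk
    have h1 : ((s.drop p).take M)[k]? = ((rc.drop q).take M)[k]? := by rw [h]
    rw [List.getElem?_eq_getElem (by simp; omega), List.getElem?_eq_getElem (by simp; omega)] at h1
    have h2 := Option.some.inj h1
    simpa [List.getElem_take, List.getElem_drop] using h2
  · intro h
    apply List.ext_getElem
    · simp; omega
    · intro k h1 h2
      have hkM : k < M := by simp at h1; omega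
      simpa [List.getElem_take, List.getElem_drop] using h k hkM

theorem pv_infix_iff_drop {l₁ l₂ : List Char} :
    l₁ <:+: l₂ ↔ ∃ j, j ≤ l₂.length ∧ l₁ <+: l₂.drop j := by
  constructor
  · rintro ⟨pre, suf, rfl⟩
    refine ⟨pre.length, by simp, suf, ?_⟩
    simp
  · rintro ⟨j, hj, t, ht⟩
    exact ⟨l₂.take j, t, by rw [List.append_assoc, ht, List.take_append_drop]⟩

-- run-counter invariant of the inner loop
theorem pvInner_iff (f : Int → Bool) (mm : Int) (l : List Int) (c : Int) (hc : 0 ≤ c) :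
    pvInner f mm l c = true ↔
      (∃ t : Nat, 1 ≤ t ∧ t ≤ l.length ∧ (l.take t).all f = true ∧ mm ≤ c + t) ∨
      (∃ i t : Nat, i + t ≤ l.length ∧ 1 ≤ t ∧ mm ≤ (t : Int) ∧ ((l.drop i).take t).all f = true) := by
  induction l generalizing c with
  | nil =>
    simp only [pvInner]
    constructor
    · intro h; exact absurd h (by simp)
    · rintro (⟨t, h1, h2, _, _⟩ | ⟨i, t, h1, h2, _, _⟩) <;> simp at h2 h1 <;> omega
  | cons a l ih =>
    simp only [pvInner]
    by_cases hf : f a = true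
    · rw [if_pos hf]
      by_cases hth : mm ≤ c + 1
      · rw [if_pos hth]
        constructor
        · intro _
          left
          exact ⟨1, le_refl 1, by simp, by simp [hf], by push_cast; omega⟩
        · intro _; rfl
      · rw [if_neg hth, ih (c + 1) (by omega)]
        constructor
        · rintro (⟨t, ht1, ht2, hall, hth2⟩ | ⟨i, t, h1, h2, h3, hall⟩)
          · left
            exact ⟨t + 1, by omega, by simp; omega, by simp [List.take_succ_cons, hf, hall],
              by push_cast at hth2 ⊢; omega⟩
          · right
            exact ⟨i + 1, t, by simp; omega, h2, h3, by simpa [List.drop_succ_cons] using hall⟩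
        · rintro (⟨t, ht1, ht2, hall, hth2⟩ | ⟨i, t, h1, h2, h3, hall⟩)
          · obtain ⟨t', rfl⟩ : ∃ t', t = t' + 1 := ⟨t - 1, by omega⟩
            rcases Nat.eq_zero_or_pos t' with rfl | ht'
            · exfalso; push_cast at hth2; omega
            · left
              refine ⟨t', ht', by simp at ht2; omega, ?_, by push_cast at hth2 ⊢; omega⟩
              simpa [List.take_succ_cons, hf] using hall
          · cases i with
            | zero =>
              obtain ⟨t', rfl⟩ : ∃ t', t = t' + 1 := ⟨t - 1, by omega⟩
              rcases Nat.eq_zero_or_pos t' with rfl | ht'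
              · exfalso; push_cast at h3; omega
              · left
                refine ⟨t', ht', by simp at h1; omega, ?_, by push_cast at h3 ⊢; omega⟩
                simpa [List.take_succ_cons, hf] using hall
            | succ i' =>
              right
              refine ⟨i', t, ?_, h2, h3, ?_⟩
              · simp at h1; omega
              · simpa using hall
    · rw [if_neg (by simp [hf]), ih 0 (le_refl 0)]
      constructor
      · rintro (⟨t, h1, h2, hall, h3⟩ | ⟨i, t, h1, h2, h3, hall⟩)
        · right
          exact ⟨1, t, by simp; omega, h1, by omega, by simpa using hall⟩
        · right
          exact ⟨i + 1, t, by simp; omega, h2, h3, by simpa using hall⟩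
      · rintro (⟨t, h1, h2, hall, h3⟩ | ⟨i, t, h1, h2, h3, hall⟩)
        · exfalso
          obtain ⟨t', rfl⟩ : ∃ t', t = t' + 1 := ⟨t - 1, by omega⟩
          simp [List.take_succ_cons, hf] at hall
        · cases i with
          | zero =>
            exfalso
            obtain ⟨t', rfl⟩ : ∃ t', t = t' + 1 := ⟨t - 1, by omega⟩
            simp [List.take_succ_cons, hf] at hall
          | succ i' =>
            right
            refine ⟨i', t, ?_, h2, h3, ?_⟩
            · simp at h1; omega
            · simpa using hall

theorem pv_all_take_mono {α : Type} {xs : List α} {f : α → Bool} {M t : Nat} (h : M ≤ t)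
    (hall : (xs.take t).all f = true) : (xs.take M).all f = true := by
  rw [List.all_eq_true] at hall ⊢
  intro x hx
  apply hall
  have he : xs.take M = (xs.take t).take M := by rw [List.take_take, min_eq_left h]
  rw [he] at hx
  exact List.mem_of_mem_take hx

-- with c = 0 and M = (max mm 1).toNat: true iff some length-M all-match window exists
theorem pvInner_window (f : Int → Bool) (mm : Int) (l : List Int) (M : Nat)
    (hM : (M : Int) = max mm 1) :
    pvInner f mm l 0 = true ↔ ∃ i : Nat, i + M ≤ l.length ∧ ((l.drop i).take M).all f = true := by
  have hM1 : 1 ≤ M := by omega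
  rw [pvInner_iff f mm l 0 (le_refl 0)]
  constructor
  · rintro (⟨t, h1, h2, hall, h3⟩ | ⟨i, t, h1, h2, h3, hall⟩)
    · have hMt : M ≤ t := by omega
      refine ⟨0, by omega, ?_⟩
      simpa using pv_all_take_mono hMt hall
    · have hMt : M ≤ t := by omega
      exact ⟨i, by omega, pv_all_take_mono hMt hall⟩
  · rintro ⟨i, h, hall⟩
    right
    exact ⟨i, M, h, hM1, by omega, hall⟩

theorem pvOuter_iff (s rc : List Char) (mm : Int) (l : List Int) :
    pvOuter s rc mm l = true ↔
      ∃ shift ∈ l, pvInner (fun i => PySem.List.pyGetD s i ' ' == PySem.List.pyGetD rc (i + shift) ' ')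
        mm (PySem.List.pyRange 0 ((s.length : Int) - shift) 1) 0 = true := by
  induction l with
  | nil => simp [pvOuter]
  | cons a l ih =>
    simp only [pvOuter]
    by_cases h : pvInner (fun i => PySem.List.pyGetD s i ' ' == PySem.List.pyGetD rc (i + a) ' ')
        mm (PySem.List.pyRange 0 ((s.length : Int) - a) 1) 0 = true
    · rw [if_pos h]
      constructor
      · intro _
        exact ⟨a, List.mem_cons_self, h⟩
      · intro _; rfl
    · rw [if_neg h, ih]
      simp only [List.mem_cons]
      constructor
      · rintro ⟨sh, hm, hi⟩; exact ⟨sh, Or.inr hm, hi⟩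
      · rintro ⟨sh, hm, hi⟩
        rcases hm with rfl | hm
        · exact absurd hi h
        · exact ⟨sh, hm, hi⟩

theorem pvA_iff (s rc : List Char) (mm : Int) (M : Nat)
    (hrc : rc.length = s.length) (hM : (M : Int) = max mm 1) :
    pvOuter s rc mm (PySem.List.pyRange 1 (s.length : Int) 1) = true ↔ pvP s rc M := by
  have hM1 : 1 ≤ M := by omega
  rw [pvOuter_iff]
  constructor
  · rintro ⟨shift, hmem, hinner⟩
    rw [PySem.List.mem_pyRange_one] at hmem
    rw [pvInner_window _ mm _ M hM] at hinner
    obtain ⟨i, hi, hall⟩ := hinner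
    rw [PySem.List.length_pyRange_one] at hi
    have hiM : (i : Int) + M ≤ (s.length : Int) - shift := by omega
    refine ⟨i, i + shift.toNat, by omega, by omega, ?_⟩
    rw [pv_windows_eq_iff s rc i (i + shift.toNat) M (by omega) (by omega)]
    intro k hk
    rw [pv_all_window _ _ i M (by rw [PySem.List.length_pyRange_one]; omega)] at hall
    have h1 := hall k hk
    rw [PySem.List.getElem_pyRange_one] at h1
    rw [PySem.List.pyGetD_eq_getElem s ' ' (by omega) (by push_cast; omega),
      PySem.List.pyGetD_eq_getElem rc ' ' (by omega) (by push_cast; omega),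
      beq_iff_eq] at h1
    have e1 : ((0 : Int) + ((i : Int) + (k : Int))).toNat = i + k := by omega
    have e2 : ((0 : Int) + ((i : Int) + (k : Int)) + shift).toNat = i + shift.toNat + k := by omega
    simp only [Int.natCast_add, e1, e2] at h1
    exact h1
  · rintro ⟨p, q, hpq, hqM, hw⟩
    refine ⟨((q - p : Nat) : Int), ?_, ?_⟩
    · rw [PySem.List.mem_pyRange_one]
      omega
    · rw [pvInner_window _ mm _ M hM]
      refine ⟨p, by rw [PySem.List.length_pyRange_one]; omega, ?_⟩
      rw [pv_all_window _ _ p M (by rw [PySem.List.length_pyRange_one]; omega)]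
      intro k hk
      rw [PySem.List.getElem_pyRange_one]
      rw [PySem.List.pyGetD_eq_getElem s ' ' (by omega) (by push_cast; omega),
        PySem.List.pyGetD_eq_getElem rc ' ' (by omega) (by push_cast; omega),
        beq_iff_eq]
      have hpt := (pv_windows_eq_iff s rc p q M (by omega) (by omega)).mp hw k hk
      have e1 : ((0 : Int) + ((p : Int) + (k : Int))).toNat = p + k := by omega
      have e2 : ((0 : Int) + ((p : Int) + (k : Int)) + ((q - p : Nat) : Int)).toNat = q + k := by omega
      simp only [Int.natCast_add, e1, e2]
      exact hpt

theorem pvB_iff (s rc : List Char) (mm : Int) (M : Nat)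
    (hrc : rc.length = s.length) (hM : (M : Int) = max mm 1) :
    ((PySem.List.pyRange 0 ((s.length : Int) - max mm 1 + 1) 1).any (fun p =>
      PySem.Chars.findFrom rc (PySem.List.slice s (some p) (some (p + max mm 1))) (p + 1) != -1)) = true
      ↔ pvP s rc M := by
  have hM1 : 1 ≤ M := by omega
  rw [List.any_eq_true]
  constructor
  · rintro ⟨p, hmem, hpred⟩
    rw [PySem.List.mem_pyRange_one] at hmem
    obtain ⟨pN, rfl⟩ : ∃ pN : Nat, p = (pN : Int) := ⟨p.toNat, by omega⟩
    have hpn : (pN : Int) + M ≤ (s.length : Int) := by omega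
    rw [bne_iff_ne] at hpred
    rw [show (pN : Int) + max mm 1 = (pN : Int) + (M : Int) by omega,
      PySem.List.slice_natCast_add,
      show (pN : Int) + 1 = ((pN + 1 : Nat) : Int) by omega,
      Ne, PySem.Chars.findFrom_natCast_eq_neg_one_iff rc _ (pN + 1) (by omega),
      not_not, pv_infix_iff_drop] at hpred
    obtain ⟨j, hj, hpre⟩ := hpred
    rw [List.drop_drop] at hpre
    have hwlen : ((s.drop pN).take M).length = M := by simp; omega
    have hqlen := hpre.length_le
    rw [hwlen] at hqlen
    simp only [List.length_drop] at hj hqlen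
    refine ⟨pN, pN + 1 + j, by omega, by omega, ?_⟩
    have := List.prefix_iff_eq_take.mp hpre
    rw [hwlen] at this
    exact this
  · rintro ⟨p, q, hpq, hqM, hw⟩
    have hpM : p + M ≤ s.length := by omega
    refine ⟨(p : Int), ?_, ?_⟩
    · rw [PySem.List.mem_pyRange_one]
      omega
    · rw [bne_iff_ne]
      rw [show (p : Int) + max mm 1 = (p : Int) + (M : Int) by omega,
        PySem.List.slice_natCast_add,
        show (p : Int) + 1 = ((p + 1 : Nat) : Int) by omega,
        Ne, PySem.Chars.findFrom_natCast_eq_neg_one_iff rc _ (p + 1) (by omega),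
        not_not, pv_infix_iff_drop]
      refine ⟨q - (p + 1), by simp; omega, ?_⟩
      rw [List.drop_drop, show p + 1 + (q - (p + 1)) = q by omega]
      rw [List.prefix_iff_eq_take]
      rw [show ((s.drop p).take M).length = M by simp; omega]
      exact hw

-- ===== VERDICT (by name: the statement is the Claim_ definition above) =====
theorem is_self_complementary_spec : Claim_equal_is_self_complementary := by
  intro seq mm _
  unfold Spec_is_self_complementary is_self_complementary is_self_complementary_alt
  set s := pvSanitize seq.toList with hs
  by_cases hg : (s.length : Int) < mm + 1
  · simp [hg]
  · simp only [hg, if_false]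
    have hrc : (pvRevComp s).length = s.length := by rw [hs]; exact pvRevComp_length _
    have hM : (((max mm 1).toNat : Int)) = max mm 1 := by omega
    rw [Bool.eq_iff_iff, pvA_iff s _ mm (max mm 1).toNat hrc hM, ← pvB_iff s _ mm (max mm 1).toNat hrc hM]
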